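-- pv_equiv track=rewrite | github.com/nchah/i-know-words-and-images | get_tweet_ids_from_image_names.py | dict_imgname_to_tweet_id
-- ===== SOURCE A (Python) =====
-- def dict_imgname_to_tweet_id(plaintext):
--     dict_imgs_tweetids = {}
--
--     for item in plaintext:
--         tweet_id = item[0:18]
--         url = item[-19:]
--         if url in dict_imgs_tweetids:
--             dict_imgs_tweetids[url].append(tweet_id)
--         else:
--             dict_imgs_tweetids[url] = [tweet_id]
--
--     return dict_imgs_tweetids
-- ===== SOURCE B (Python) =====
-- def dict_imgname_to_tweet_id(plaintext):
--     pairs = [(item[0:18], item[-19:]) for item in plaintext]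
--     urls = dict.fromkeys(u for _, u in pairs)
--     return {u: [t for t, v in pairs if v == u] for u in urls}
-- ===== Notes on version B (the rewrite author's own statement) =====
-- stated objective: idiomatic
-- what changed: Replaces the single-pass dict accumulation (lookup + append/insert per item) by a declarative two-phase form: precompute (tweet_id, url) pairs, take the ordered distinct urls with dict.fromkeys, and build the result as a dict comprehension collecting each url's tweet_ids by a per-key scan.
import Mathlib
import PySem

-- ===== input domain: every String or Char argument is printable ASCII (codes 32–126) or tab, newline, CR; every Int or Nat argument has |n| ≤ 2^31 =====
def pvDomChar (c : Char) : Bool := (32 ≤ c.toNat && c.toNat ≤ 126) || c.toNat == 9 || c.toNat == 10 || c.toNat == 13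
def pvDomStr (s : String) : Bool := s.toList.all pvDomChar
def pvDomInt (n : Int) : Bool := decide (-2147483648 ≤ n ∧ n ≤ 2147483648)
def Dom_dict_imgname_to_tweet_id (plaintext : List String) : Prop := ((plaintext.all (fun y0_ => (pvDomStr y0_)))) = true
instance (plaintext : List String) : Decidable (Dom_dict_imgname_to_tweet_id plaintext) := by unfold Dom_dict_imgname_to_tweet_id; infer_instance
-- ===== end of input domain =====

-- B replaces the single-pass dict accumulation by ordered-distinct-urls + per-url collection (idiomatic two-phase form, same results, not faster).
-- ===== PORT A =====
def dict_imgname_to_tweet_id (plaintext : List String) : List (String × List String) :=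
  (plaintext.foldl (fun d item =>
      let tweet_id := PySem.Str.slice item (some 0) (some 18)
      let url := PySem.Str.slice item (some (-19)) none
      if d.contains url then d.modify url [] (fun l => l ++ [tweet_id])
      else d.insert url [tweet_id])
    PySem.Dict.empty).items

-- ===== PORT B =====
def dict_imgname_to_tweet_id_alt (plaintext : List String) : List (String × List String) :=
  let pairs := plaintext.map (fun item =>
      (PySem.Str.slice item (some 0) (some 18), PySem.Str.slice item (some (-19)) none))
  let urls := PySem.List.dedup (pairs.map (fun p => p.2))
  urls.map (fun u => (u, pairs.filterMap (fun p => if p.2 == u then some p.1 else none)))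

-- ===== PRECONDITION & SPEC =====
def Spec_dict_imgname_to_tweet_id (plaintext : List String) (out : List (String × List String)) : Prop := out = dict_imgname_to_tweet_id_alt plaintext
instance (plaintext : List String) (out : List (String × List String)) : Decidable (Spec_dict_imgname_to_tweet_id plaintext out) := by unfold Spec_dict_imgname_to_tweet_id; infer_instance

-- ===== CLAIM (what is proved, stated in full; the proofs are below) =====
def Claim_equal_dict_imgname_to_tweet_id : Prop := ∀ (plaintext : List String), Dom_dict_imgname_to_tweet_id plaintext → Spec_dict_imgname_to_tweet_id plaintext (dict_imgname_to_tweet_id plaintext)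

-- ===== LEMMAS AND PROOFS =====

-- filtering a mapped list, then projecting, in one step
theorem pvFilterMap_if {α β : Type} (p : α → Bool) (f : α → β) (l : List α) :
    l.filterMap (fun x => if p x then some (f x) else none) = (l.filter p).map f := by
  induction l with
  | nil => rfl
  | cons a t ih =>
    simp only [List.filterMap_cons, List.filter_cons]
    by_cases h : p a <;> simp [h, ih]

-- A's branching step is exactly a Dict.modify with default []
theorem pvStep_eq (d : PySem.Dict String (List String)) (u t : String) :
    (if d.contains u then d.modify u [] (fun l => l ++ [t]) else d.insert u [t])
      = d.modify u [] (fun l => l ++ [t]) := by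
  by_cases h : d.contains u
  · simp [h]
  · simp only [Bool.not_eq_true] at h
    simp [h, PySem.Dict.modify, PySem.Dict.getD_of_not_contains _ _ h]

theorem pvMain (plaintext : List String) :
    dict_imgname_to_tweet_id plaintext = dict_imgname_to_tweet_id_alt plaintext := by
  unfold dict_imgname_to_tweet_id dict_imgname_to_tweet_id_alt
  simp only []
  set tid := fun item => PySem.Str.slice item (some 0) (some 18) with htid
  set key := fun item => PySem.Str.slice item (some (-19)) none with hkey
  -- rewrite A's fold step to the pure modify step
  have h1 : plaintext.foldl (fun d item =>
        if d.contains (key item) then d.modify (key item) [] (fun l => l ++ [tid item])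
        else d.insert (key item) [tid item]) PySem.Dict.empty
      = plaintext.foldl (fun d item => d.modify (key item) [] (fun l => l ++ [tid item]))
          PySem.Dict.empty := by
    apply List.foldl_ext
    intro d item _
    exact pvStep_eq d (key item) (tid item)
  rw [h1]
  -- view the fold as a fold over (url, tweet_id) pairs
  have h2 : plaintext.foldl (fun d item => d.modify (key item) [] (fun l => l ++ [tid item]))
        PySem.Dict.empty
      = (plaintext.map (fun item => (key item, tid item))).foldl
          (fun d p => d.modify p.1 [] (fun l => l ++ [p.2])) PySem.Dict.empty := by
    rw [List.foldl_map]
  rw [h2]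
  set ps := plaintext.map (fun item => (key item, tid item)) with hps
  set D := ps.foldl (fun d p => d.modify p.1 [] (fun l => l ++ [p.2])) PySem.Dict.empty with hD
  have hnodup : D.keys.Nodup := by
    rw [hD]
    exact PySem.Dict.nodup_keys_foldl_modify_key ps Prod.fst [] (fun _ p l => l ++ [p.2]) _
      (by simp [PySem.Dict.keys_empty])
  have hkeys : D.keys = PySem.Set.ofList (ps.map Prod.fst) := by
    rw [hD, PySem.Dict.keys_foldl_modify_key ps Prod.fst [] (fun _ p l => l ++ [p.2])]
    simp [PySem.Dict.keys_empty, PySem.Set.update, PySem.Set.ofList, PySem.Set.empty]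
  have hgetD : ∀ c, D.getD c [] = ((ps.filter (fun p => p.1 == c)).map (fun p => p.2)) := by
    intro c
    rw [hD, PySem.Dict.getD_foldl_modify_append ps PySem.Dict.empty c]
    simp [PySem.Dict.getD_empty]
  rw [PySem.Dict.items_eq_map_keys D hnodup [], hkeys]
  -- both sides are maps over the same ordered distinct url list
  have hurls : PySem.List.dedup
        ((plaintext.map (fun item => (tid item, key item))).map (fun p => p.2))
      = PySem.Set.ofList (ps.map Prod.fst) := by
    rw [PySem.List.dedup_eq_ofList, hps]
    simp [List.map_map, Function.comp_def]
  rw [hurls]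
  apply List.map_congr_left
  intro u _
  refine Prod.ext rfl ?_
  rw [hgetD u, hps]
  rw [pvFilterMap_if (fun p => p.2 == u) (fun p => p.1)
      (plaintext.map (fun item => (tid item, key item)))]
  simp [List.filter_map, List.map_map, Function.comp_def]

-- ===== VERDICT (by name: the statement is the Claim_ definition above) =====
theorem dict_imgname_to_tweet_id_spec : Claim_equal_dict_imgname_to_tweet_id := by
  intro plaintext _
  unfold Spec_dict_imgname_to_tweet_id
  exact pvMain plaintext
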